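-- pv_equiv track=rewrite | github.com/carpsesdema/RAG_Content_Scraper | utils/pinescript_categorizer.py | _determine_use_cases
-- ===== SOURCE A (Python) =====
-- from typing import Dict, List, Set
--
-- def _determine_use_cases(categories: Set[str], patterns: Set[str]) -> Set[str]:
--     """Determine practical use cases for trading."""
--     use_cases = set()
--
--     # Strategy development
--     if any(cat in categories for cat in ['strategies', 'backtesting', 'risk_management']):
--         use_cases.add('strategy_development')
--
--     # Technical analysis
--     if any(cat in categories for cat in ['indicators', 'oscillators', 'momentum', 'volatility']):
--         use_cases.add('technical_analysis')
--
--     # Alert systems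
--     if 'alerts' in categories or 'alerts' in patterns:
--         use_cases.add('alert_systems')
--
--     # Visualization
--     if any(cat in categories for cat in ['plotting', 'visual_elements']):
--         use_cases.add('chart_visualization')
--
--     # Automation
--     if any(cat in categories for cat in ['automation', 'webhook']):
--         use_cases.add('trading_automation')
--
--     # Research and analysis
--     if any(cat in categories for cat in ['multi_timeframe', 'data_manipulation']):
--         use_cases.add('market_research')
--
--     # Portfolio management
--     if any(cat in categories for cat in ['portfolio_management', 'correlation']):
--         use_cases.add('portfolio_analysis')
--
--     # Education
--     if any(pattern in patterns for pattern in ['input_parameters', 'plotting']):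
--         use_cases.add('educational_tools')
--
--     return use_cases
-- ===== SOURCE B (Python) =====
-- _CATEGORY_LABEL = {
--     "strategies": "strategy_development",
--     "backtesting": "strategy_development",
--     "risk_management": "strategy_development",
--     "indicators": "technical_analysis",
--     "oscillators": "technical_analysis",
--     "momentum": "technical_analysis",
--     "volatility": "technical_analysis",
--     "alerts": "alert_systems",
--     "plotting": "chart_visualization",
--     "visual_elements": "chart_visualization",
--     "automation": "trading_automation",
--     "webhook": "trading_automation",
--     "multi_timeframe": "market_research",
--     "data_manipulation": "market_research",
--     "portfolio_management": "portfolio_analysis",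
--     "correlation": "portfolio_analysis",
-- }
--
-- _PATTERN_LABEL = {
--     "alerts": "alert_systems",
--     "input_parameters": "educational_tools",
--     "plotting": "educational_tools",
-- }
--
-- _LABELS = [
--     "strategy_development", "technical_analysis", "alert_systems",
--     "chart_visualization", "trading_automation", "market_research",
--     "portfolio_analysis", "educational_tools",
-- ]
--
-- def _determine_use_cases(categories, patterns):
--     """Reverse index: look each input keyword up instead of scanning keyword lists."""
--     hits = set()
--     for c in categories:
--         label = _CATEGORY_LABEL.get(c)
--         if label is not None:
--             hits.add(label)
--     for p in patterns:
--         label = _PATTERN_LABEL.get(p)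
--         if label is not None:
--             hits.add(label)
--     return {label for label in _LABELS if label in hits}
-- ===== Notes on version B (the rewrite author's own statement) =====
-- stated objective: alternative
-- what changed: Replaces the eight keyword-list scans with a reverse index (keyword -> use-case label): one dict lookup per input element accumulates the hit labels, which are then emitted in canonical label order.
import Mathlib
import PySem

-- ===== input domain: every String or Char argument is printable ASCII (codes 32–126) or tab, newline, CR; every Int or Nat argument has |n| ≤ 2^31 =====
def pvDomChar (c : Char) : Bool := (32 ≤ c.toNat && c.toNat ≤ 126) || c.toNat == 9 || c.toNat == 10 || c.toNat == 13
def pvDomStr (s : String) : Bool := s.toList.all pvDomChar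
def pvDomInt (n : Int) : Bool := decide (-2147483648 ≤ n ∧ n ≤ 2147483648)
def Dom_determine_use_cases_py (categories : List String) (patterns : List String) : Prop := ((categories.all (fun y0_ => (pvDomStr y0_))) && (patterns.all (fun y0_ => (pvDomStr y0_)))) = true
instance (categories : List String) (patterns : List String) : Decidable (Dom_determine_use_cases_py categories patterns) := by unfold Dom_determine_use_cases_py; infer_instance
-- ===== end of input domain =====

-- B inverts A's eight keyword-list scans into a reverse index (keyword → use-case label) looked up once per input element (alternative decomposition).

-- ===== PORT A =====
def determine_use_cases_py (categories : List String) (patterns : List String) : List String :=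
  let use_cases : PySem.Set String := PySem.Set.empty
  let use_cases := if ["strategies", "backtesting", "risk_management"].any (fun cat => categories.contains cat)
    then PySem.Set.add use_cases "strategy_development" else use_cases
  let use_cases := if ["indicators", "oscillators", "momentum", "volatility"].any (fun cat => categories.contains cat)
    then PySem.Set.add use_cases "technical_analysis" else use_cases
  let use_cases := if categories.contains "alerts" || patterns.contains "alerts"
    then PySem.Set.add use_cases "alert_systems" else use_cases
  let use_cases := if ["plotting", "visual_elements"].any (fun cat => categories.contains cat)
    then PySem.Set.add use_cases "chart_visualization" else use_cases
  let use_cases := if ["automation", "webhook"].any (fun cat => categories.contains cat)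
    then PySem.Set.add use_cases "trading_automation" else use_cases
  let use_cases := if ["multi_timeframe", "data_manipulation"].any (fun cat => categories.contains cat)
    then PySem.Set.add use_cases "market_research" else use_cases
  let use_cases := if ["portfolio_management", "correlation"].any (fun cat => categories.contains cat)
    then PySem.Set.add use_cases "portfolio_analysis" else use_cases
  let use_cases := if ["input_parameters", "plotting"].any (fun pattern => patterns.contains pattern)
    then PySem.Set.add use_cases "educational_tools" else use_cases
  use_cases

-- ===== PORT B =====
-- reverse index: category keyword → use-case label
def pvCategoryLabel : PySem.Dict String String := PySem.Dict.mk
  [ ("strategies", "strategy_development"),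
    ("backtesting", "strategy_development"),
    ("risk_management", "strategy_development"),
    ("indicators", "technical_analysis"),
    ("oscillators", "technical_analysis"),
    ("momentum", "technical_analysis"),
    ("volatility", "technical_analysis"),
    ("alerts", "alert_systems"),
    ("plotting", "chart_visualization"),
    ("visual_elements", "chart_visualization"),
    ("automation", "trading_automation"),
    ("webhook", "trading_automation"),
    ("multi_timeframe", "market_research"),
    ("data_manipulation", "market_research"),
    ("portfolio_management", "portfolio_analysis"),
    ("correlation", "portfolio_analysis") ]

-- reverse index: pattern keyword → use-case label
def pvPatternLabel : PySem.Dict String String := PySem.Dict.mk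
  [ ("alerts", "alert_systems"),
    ("input_parameters", "educational_tools"),
    ("plotting", "educational_tools") ]

def pvLabels : List String :=
  [ "strategy_development", "technical_analysis", "alert_systems",
    "chart_visualization", "trading_automation", "market_research",
    "portfolio_analysis", "educational_tools" ]

def determine_use_cases_py_alt (categories : List String) (patterns : List String) : List String :=
  let hits : PySem.Set String := PySem.Set.empty
  let hits := categories.foldl (fun hits c =>
    match PySem.Dict.get? pvCategoryLabel c with
    | some label => PySem.Set.add hits label
    | none => hits) hits
  let hits := patterns.foldl (fun hits p =>
    match PySem.Dict.get? pvPatternLabel p with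
    | some label => PySem.Set.add hits label
    | none => hits) hits
  PySem.Set.ofList (pvLabels.filter (fun label => PySem.Set.contains hits label))

-- ===== PRECONDITION & SPEC =====
def Spec_determine_use_cases_py (categories : List String) (patterns : List String) (out : List String) : Prop := out = determine_use_cases_py_alt categories patterns
instance (categories : List String) (patterns : List String) (out : List String) : Decidable (Spec_determine_use_cases_py categories patterns out) := by unfold Spec_determine_use_cases_py; infer_instance

-- ===== CLAIM (what is proved, stated in full; the proofs are below) =====
def Claim_equal_determine_use_cases_py : Prop := ∀ (categories : List String) (patterns : List String), Dom_determine_use_cases_py categories patterns → Spec_determine_use_cases_py categories patterns (determine_use_cases_py categories patterns)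

-- ===== LEMMAS AND PROOFS =====

-- membership in a "look each element up and add the hit" loop
theorem mem_lookup_foldl (d : PySem.Dict String String) (xs : List String)
    (s : PySem.Set String) (lab : String) :
    lab ∈ xs.foldl (fun s c =>
      match PySem.Dict.get? d c with
      | some label => PySem.Set.add s label
      | none => s) s ↔ lab ∈ s ∨ ∃ c ∈ xs, PySem.Dict.get? d c = some lab := by
  induction xs generalizing s with
  | nil => simp
  | cons x xs ih =>
    cases h : PySem.Dict.get? d x <;>
      simp [List.foldl_cons, h, ih, PySem.Set.mem_add]
    tauto

theorem contains_hits (categories patterns : List String) (lab : String) :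
    PySem.Set.contains
      (patterns.foldl (fun hits p =>
        match PySem.Dict.get? pvPatternLabel p with
        | some label => PySem.Set.add hits label
        | none => hits)
        (categories.foldl (fun hits c =>
          match PySem.Dict.get? pvCategoryLabel c with
          | some label => PySem.Set.add hits label
          | none => hits) ([] : PySem.Set String))) lab
    = ((categories.any fun c => PySem.Dict.get? pvCategoryLabel c == some lab)
       || (patterns.any fun p => PySem.Dict.get? pvPatternLabel p == some lab)) := by
  rw [Bool.eq_iff_iff]
  simp only [PySem.Set.contains_iff, mem_lookup_foldl, Bool.or_eq_true, List.any_eq_true,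
    beq_iff_eq]
  simp


-- get? of a literal dict with distinct keys is membership in its pair list
theorem get?_mk_eq_some_iff (l : List (String × String)) (hnd : (l.map Prod.fst).Nodup) (c v : String) :
    PySem.Dict.get? (PySem.Dict.mk l) c = some v ↔ (c, v) ∈ l := by
  induction l with
  | nil => simp [show PySem.Dict.get? (PySem.Dict.mk ([] : List (String × String))) c = none from rfl]
  | cons p rest ih =>
    obtain ⟨k, w⟩ := p
    simp only [List.map_cons, List.nodup_cons] at hnd
    rw [PySem.Dict.get?_mk_cons]
    by_cases hkc : k = c
    · subst hkc
      simp only [beq_self_eq_true, if_true, List.mem_cons, Prod.mk.injEq]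
      constructor
      · intro h
        injection h with h'
        exact Or.inl ⟨trivial, h'.symm⟩
      · rintro (⟨-, rfl⟩ | hmem)
        · rfl
        · exact absurd (List.mem_map_of_mem (f := Prod.fst) hmem) (by simpa using hnd.1)
    · rw [if_neg (by simpa using hkc)]
      rw [ih hnd.2]
      simp [Prod.mk.injEq, Ne.symm hkc]

-- "some input element maps to L" = "some key of L occurs in the input"
theorem anyLookup (d : PySem.Dict String String) (xs : List String) (L : String) (ks : List String)
    (hk : ∀ c, PySem.Dict.get? d c = some L ↔ c ∈ ks) :
    (xs.any fun c => PySem.Dict.get? d c == some L) = ks.any (fun k => xs.contains k) := by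
  rw [Bool.eq_iff_iff]
  simp only [List.any_eq_true, beq_iff_eq, hk, List.contains_iff_mem]
  tauto

theorem keysCat_strategy_development (c : String) : PySem.Dict.get? pvCategoryLabel c = some "strategy_development" ↔ c ∈ (["strategies", "backtesting", "risk_management"] : List String) := by
  rw [show pvCategoryLabel = PySem.Dict.mk pvCategoryLabel.items from rfl, get?_mk_eq_some_iff _ (by decide)]
  simp [pvCategoryLabel]

theorem condCat_strategy_development (xs : List String) : (xs.any fun c => PySem.Dict.get? pvCategoryLabel c == some "strategy_development") = (["strategies", "backtesting", "risk_management"] : List String).any (fun k => xs.contains k) :=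
  anyLookup _ _ _ _ keysCat_strategy_development

theorem keysCat_technical_analysis (c : String) : PySem.Dict.get? pvCategoryLabel c = some "technical_analysis" ↔ c ∈ (["indicators", "oscillators", "momentum", "volatility"] : List String) := by
  rw [show pvCategoryLabel = PySem.Dict.mk pvCategoryLabel.items from rfl, get?_mk_eq_some_iff _ (by decide)]
  simp [pvCategoryLabel]

theorem condCat_technical_analysis (xs : List String) : (xs.any fun c => PySem.Dict.get? pvCategoryLabel c == some "technical_analysis") = (["indicators", "oscillators", "momentum", "volatility"] : List String).any (fun k => xs.contains k) :=
  anyLookup _ _ _ _ keysCat_technical_analysis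

theorem keysCat_alert_systems (c : String) : PySem.Dict.get? pvCategoryLabel c = some "alert_systems" ↔ c ∈ (["alerts"] : List String) := by
  rw [show pvCategoryLabel = PySem.Dict.mk pvCategoryLabel.items from rfl, get?_mk_eq_some_iff _ (by decide)]
  simp [pvCategoryLabel]

theorem condCat_alert_systems (xs : List String) : (xs.any fun c => PySem.Dict.get? pvCategoryLabel c == some "alert_systems") = (["alerts"] : List String).any (fun k => xs.contains k) :=
  anyLookup _ _ _ _ keysCat_alert_systems

theorem keysCat_chart_visualization (c : String) : PySem.Dict.get? pvCategoryLabel c = some "chart_visualization" ↔ c ∈ (["plotting", "visual_elements"] : List String) := by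
  rw [show pvCategoryLabel = PySem.Dict.mk pvCategoryLabel.items from rfl, get?_mk_eq_some_iff _ (by decide)]
  simp [pvCategoryLabel]

theorem condCat_chart_visualization (xs : List String) : (xs.any fun c => PySem.Dict.get? pvCategoryLabel c == some "chart_visualization") = (["plotting", "visual_elements"] : List String).any (fun k => xs.contains k) :=
  anyLookup _ _ _ _ keysCat_chart_visualization

theorem keysCat_trading_automation (c : String) : PySem.Dict.get? pvCategoryLabel c = some "trading_automation" ↔ c ∈ (["automation", "webhook"] : List String) := by
  rw [show pvCategoryLabel = PySem.Dict.mk pvCategoryLabel.items from rfl, get?_mk_eq_some_iff _ (by decide)]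
  simp [pvCategoryLabel]

theorem condCat_trading_automation (xs : List String) : (xs.any fun c => PySem.Dict.get? pvCategoryLabel c == some "trading_automation") = (["automation", "webhook"] : List String).any (fun k => xs.contains k) :=
  anyLookup _ _ _ _ keysCat_trading_automation

theorem keysCat_market_research (c : String) : PySem.Dict.get? pvCategoryLabel c = some "market_research" ↔ c ∈ (["multi_timeframe", "data_manipulation"] : List String) := by
  rw [show pvCategoryLabel = PySem.Dict.mk pvCategoryLabel.items from rfl, get?_mk_eq_some_iff _ (by decide)]
  simp [pvCategoryLabel]

theorem condCat_market_research (xs : List String) : (xs.any fun c => PySem.Dict.get? pvCategoryLabel c == some "market_research") = (["multi_timeframe", "data_manipulation"] : List String).any (fun k => xs.contains k) :=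
  anyLookup _ _ _ _ keysCat_market_research

theorem keysCat_portfolio_analysis (c : String) : PySem.Dict.get? pvCategoryLabel c = some "portfolio_analysis" ↔ c ∈ (["portfolio_management", "correlation"] : List String) := by
  rw [show pvCategoryLabel = PySem.Dict.mk pvCategoryLabel.items from rfl, get?_mk_eq_some_iff _ (by decide)]
  simp [pvCategoryLabel]

theorem condCat_portfolio_analysis (xs : List String) : (xs.any fun c => PySem.Dict.get? pvCategoryLabel c == some "portfolio_analysis") = (["portfolio_management", "correlation"] : List String).any (fun k => xs.contains k) :=
  anyLookup _ _ _ _ keysCat_portfolio_analysis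

theorem keysCat_educational_tools (c : String) : PySem.Dict.get? pvCategoryLabel c = some "educational_tools" ↔ c ∈ ([] : List String) := by
  rw [show pvCategoryLabel = PySem.Dict.mk pvCategoryLabel.items from rfl, get?_mk_eq_some_iff _ (by decide)]
  simp [pvCategoryLabel]

theorem condCat_educational_tools (xs : List String) : (xs.any fun c => PySem.Dict.get? pvCategoryLabel c == some "educational_tools") = ([] : List String).any (fun k => xs.contains k) :=
  anyLookup _ _ _ _ keysCat_educational_tools

theorem keysPat_strategy_development (c : String) : PySem.Dict.get? pvPatternLabel c = some "strategy_development" ↔ c ∈ ([] : List String) := by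
  rw [show pvPatternLabel = PySem.Dict.mk pvPatternLabel.items from rfl, get?_mk_eq_some_iff _ (by decide)]
  simp [pvPatternLabel]

theorem condPat_strategy_development (xs : List String) : (xs.any fun c => PySem.Dict.get? pvPatternLabel c == some "strategy_development") = ([] : List String).any (fun k => xs.contains k) :=
  anyLookup _ _ _ _ keysPat_strategy_development

theorem keysPat_technical_analysis (c : String) : PySem.Dict.get? pvPatternLabel c = some "technical_analysis" ↔ c ∈ ([] : List String) := by
  rw [show pvPatternLabel = PySem.Dict.mk pvPatternLabel.items from rfl, get?_mk_eq_some_iff _ (by decide)]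
  simp [pvPatternLabel]

theorem condPat_technical_analysis (xs : List String) : (xs.any fun c => PySem.Dict.get? pvPatternLabel c == some "technical_analysis") = ([] : List String).any (fun k => xs.contains k) :=
  anyLookup _ _ _ _ keysPat_technical_analysis

theorem keysPat_alert_systems (c : String) : PySem.Dict.get? pvPatternLabel c = some "alert_systems" ↔ c ∈ (["alerts"] : List String) := by
  rw [show pvPatternLabel = PySem.Dict.mk pvPatternLabel.items from rfl, get?_mk_eq_some_iff _ (by decide)]
  simp [pvPatternLabel]

theorem condPat_alert_systems (xs : List String) : (xs.any fun c => PySem.Dict.get? pvPatternLabel c == some "alert_systems") = (["alerts"] : List String).any (fun k => xs.contains k) :=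
  anyLookup _ _ _ _ keysPat_alert_systems

theorem keysPat_chart_visualization (c : String) : PySem.Dict.get? pvPatternLabel c = some "chart_visualization" ↔ c ∈ ([] : List String) := by
  rw [show pvPatternLabel = PySem.Dict.mk pvPatternLabel.items from rfl, get?_mk_eq_some_iff _ (by decide)]
  simp [pvPatternLabel]

theorem condPat_chart_visualization (xs : List String) : (xs.any fun c => PySem.Dict.get? pvPatternLabel c == some "chart_visualization") = ([] : List String).any (fun k => xs.contains k) :=
  anyLookup _ _ _ _ keysPat_chart_visualization

theorem keysPat_trading_automation (c : String) : PySem.Dict.get? pvPatternLabel c = some "trading_automation" ↔ c ∈ ([] : List String) := by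
  rw [show pvPatternLabel = PySem.Dict.mk pvPatternLabel.items from rfl, get?_mk_eq_some_iff _ (by decide)]
  simp [pvPatternLabel]

theorem condPat_trading_automation (xs : List String) : (xs.any fun c => PySem.Dict.get? pvPatternLabel c == some "trading_automation") = ([] : List String).any (fun k => xs.contains k) :=
  anyLookup _ _ _ _ keysPat_trading_automation

theorem keysPat_market_research (c : String) : PySem.Dict.get? pvPatternLabel c = some "market_research" ↔ c ∈ ([] : List String) := by
  rw [show pvPatternLabel = PySem.Dict.mk pvPatternLabel.items from rfl, get?_mk_eq_some_iff _ (by decide)]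
  simp [pvPatternLabel]

theorem condPat_market_research (xs : List String) : (xs.any fun c => PySem.Dict.get? pvPatternLabel c == some "market_research") = ([] : List String).any (fun k => xs.contains k) :=
  anyLookup _ _ _ _ keysPat_market_research

theorem keysPat_portfolio_analysis (c : String) : PySem.Dict.get? pvPatternLabel c = some "portfolio_analysis" ↔ c ∈ ([] : List String) := by
  rw [show pvPatternLabel = PySem.Dict.mk pvPatternLabel.items from rfl, get?_mk_eq_some_iff _ (by decide)]
  simp [pvPatternLabel]

theorem condPat_portfolio_analysis (xs : List String) : (xs.any fun c => PySem.Dict.get? pvPatternLabel c == some "portfolio_analysis") = ([] : List String).any (fun k => xs.contains k) :=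
  anyLookup _ _ _ _ keysPat_portfolio_analysis

theorem keysPat_educational_tools (c : String) : PySem.Dict.get? pvPatternLabel c = some "educational_tools" ↔ c ∈ (["input_parameters", "plotting"] : List String) := by
  rw [show pvPatternLabel = PySem.Dict.mk pvPatternLabel.items from rfl, get?_mk_eq_some_iff _ (by decide)]
  simp [pvPatternLabel]

theorem condPat_educational_tools (xs : List String) : (xs.any fun c => PySem.Dict.get? pvPatternLabel c == some "educational_tools") = (["input_parameters", "plotting"] : List String).any (fun k => xs.contains k) :=
  anyLookup _ _ _ _ keysPat_educational_tools

-- ===== VERDICT (by name: the statement is the Claim_ definition above) =====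

-- the conditional-add chain with fresh labels is "the selected labels, in order"
theorem foldl_condAdd (ps : List (String × Bool)) (s : PySem.Set String)
    (hnd : (ps.map Prod.fst).Nodup) (hout : ∀ x ∈ ps.map Prod.fst, x ∉ s) :
    ps.foldl (fun acc p => if p.2 then PySem.Set.add acc p.1 else acc) s
      = s ++ (ps.filter (fun p => p.2)).map Prod.fst := by
  induction ps generalizing s with
  | nil => simp
  | cons p rest ih =>
    simp only [List.map_cons, List.nodup_cons, List.mem_cons] at hnd hout
    by_cases hb : p.2 = true
    · rw [List.foldl_cons]
      simp only [hb, if_true]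
      rw [PySem.Set.add_of_not_mem (hout p.1 (Or.inl rfl)),
        ih (s ++ [p.1]) hnd.2 (fun x hx => by
          simp only [List.mem_append, List.mem_singleton]
          rintro (h | rfl)
          · exact hout x (Or.inr hx) h
          · exact hnd.1 hx)]
      simp [hb]
    · rw [Bool.not_eq_true] at hb
      rw [List.foldl_cons]
      simp only [hb, Bool.false_eq_true, if_false]
      rw [ih s hnd.2 (fun x hx => hout x (Or.inr hx))]
      simp [hb]

-- filtering the labels equals filtering the (label, flag) pairs when flags agree
theorem filter_map_fst (ps : List (String × Bool)) (pred : String → Bool)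
    (h : ∀ p ∈ ps, pred p.1 = p.2) :
    (ps.map Prod.fst).filter pred = (ps.filter (fun p => p.2)).map Prod.fst := by
  induction ps with
  | nil => rfl
  | cons p rest ih =>
    have hp := h p (List.mem_cons_self)
    by_cases hb : p.2 = true <;>
      simp [hp, hb, ih (fun q hq => h q (List.mem_cons_of_mem _ hq))]

theorem ofList_filter_labels (p : String → Bool) :
    PySem.Set.ofList (pvLabels.filter p) = pvLabels.filter p :=
  PySem.Set.ofList_eq_self_of_nodup _ (List.Nodup.filter p (show pvLabels.Nodup by decide))

-- ===== VERDICT (by name: the statement is the Claim_ definition above) =====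
set_option maxHeartbeats 1000000 in
theorem determine_use_cases_py_spec : Claim_equal_determine_use_cases_py := by
  intro categories patterns _
  unfold Spec_determine_use_cases_py
  show ([ ("strategy_development", ["strategies", "backtesting", "risk_management"].any (fun cat => categories.contains cat)),
          ("technical_analysis", ["indicators", "oscillators", "momentum", "volatility"].any (fun cat => categories.contains cat)),
          ("alert_systems", categories.contains "alerts" || patterns.contains "alerts"),
          ("chart_visualization", ["plotting", "visual_elements"].any (fun cat => categories.contains cat)),
          ("trading_automation", ["automation", "webhook"].any (fun cat => categories.contains cat)),
          ("market_research", ["multi_timeframe", "data_manipulation"].any (fun cat => categories.contains cat)),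
          ("portfolio_analysis", ["portfolio_management", "correlation"].any (fun cat => categories.contains cat)),
          ("educational_tools", ["input_parameters", "plotting"].any (fun pattern => patterns.contains pattern)) ]
      : List (String × Bool)).foldl (fun acc p => if p.2 then PySem.Set.add acc p.1 else acc) PySem.Set.empty
    = determine_use_cases_py_alt categories patterns
  rw [foldl_condAdd _ _ (by simp) (by intro x _ hx; exact List.not_mem_nil hx)]
  unfold determine_use_cases_py_alt
  dsimp only
  simp only [PySem.Set.empty, List.nil_append]
  rw [ofList_filter_labels]
  show _ = List.filter _ pvLabels
  rw [show pvLabels = List.map Prod.fst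
    [ (("strategy_development" : String), ["strategies", "backtesting", "risk_management"].any (fun cat => categories.contains cat)),
      ("technical_analysis", ["indicators", "oscillators", "momentum", "volatility"].any (fun cat => categories.contains cat)),
      ("alert_systems", categories.contains "alerts" || patterns.contains "alerts"),
      ("chart_visualization", ["plotting", "visual_elements"].any (fun cat => categories.contains cat)),
      ("trading_automation", ["automation", "webhook"].any (fun cat => categories.contains cat)),
      ("market_research", ["multi_timeframe", "data_manipulation"].any (fun cat => categories.contains cat)),
      ("portfolio_analysis", ["portfolio_management", "correlation"].any (fun cat => categories.contains cat)),
      ("educational_tools", ["input_parameters", "plotting"].any (fun pattern => patterns.contains pattern)) ] from rfl]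
  rw [filter_map_fst]
  intro p hp
  simp only [List.mem_cons, List.not_mem_nil, or_false] at hp
  rcases hp with rfl | rfl | rfl | rfl | rfl | rfl | rfl | rfl <;>
  · rw [contains_hits]
    simp only [condCat_strategy_development, condCat_technical_analysis,
      condCat_alert_systems, condCat_chart_visualization, condCat_trading_automation,
      condCat_market_research, condCat_portfolio_analysis, condCat_educational_tools,
      condPat_strategy_development, condPat_technical_analysis, condPat_alert_systems,
      condPat_chart_visualization, condPat_trading_automation, condPat_market_research,
      condPat_portfolio_analysis, condPat_educational_tools]
    simp
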